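-- pv_equiv track=rewrite | github.com/nadavhalahmi/SD_EX1 | coursetorrent-test/build/resources/test/torrent_http_server.py | convert_url_hash_to_hex
-- ===== SOURCE A (Python) =====
-- def convert_url_hash_to_hex(infohash):
--     """
--
--
--     Parameters
--     ----------
--     infohash : string
--         infohash as received in the http request
--
--     Returns
--     -------
--     res : string
--         hex representation of the infohash
--
--     """
--     idx=0
--     res=''
--     while idx < len(infohash):
--         if infohash[idx]!='%':
--             res+=infohash[idx].encode('utf8').hex()
--             idx +=1
--         else:
--             res+=infohash[idx+1:idx+3]
--             idx+=3
--     return res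
-- ===== SOURCE B (Python) =====
-- def convert_url_hash_to_hex(infohash):
--     out = []
--     i = 0
--     n = len(infohash)
--     while i < n:
--         j = infohash.find('%', i)
--         if j == -1:
--             j = n
--         out.append(infohash[i:j].encode('utf8').hex())
--         if j < n:
--             out.append(infohash[j+1:j+3])
--         i = j + 3
--     return ''.join(out)
-- ===== Notes on version B (the rewrite author's own statement) =====
-- stated objective: alternative
-- what changed: Replaced A's per-character index loop (hex-encoding one character at a time) by find('%')-based chunking that batch-encodes each whole run between '%' markers and joins the pieces at the end.
import Mathlib
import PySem

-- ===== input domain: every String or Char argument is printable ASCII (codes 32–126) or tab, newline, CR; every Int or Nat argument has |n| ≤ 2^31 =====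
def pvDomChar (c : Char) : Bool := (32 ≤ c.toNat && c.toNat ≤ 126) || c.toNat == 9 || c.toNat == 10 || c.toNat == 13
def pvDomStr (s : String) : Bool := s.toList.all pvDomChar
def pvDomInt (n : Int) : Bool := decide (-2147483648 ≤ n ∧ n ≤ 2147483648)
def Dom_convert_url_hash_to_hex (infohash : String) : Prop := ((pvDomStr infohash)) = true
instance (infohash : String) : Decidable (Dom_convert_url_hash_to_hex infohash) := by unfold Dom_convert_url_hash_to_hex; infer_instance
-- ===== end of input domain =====

-- B replaces A's per-character index loop by find('%')-based chunking that batch-encodes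
-- each run between '%' markers and joins the pieces (objective: alternative decomposition).

-- ===== PORT A =====
-- c.encode('utf8').hex() for one character: exact for code points < 128 (all of Dom)
def pvHexDigit (n : Nat) : Char := if n < 10 then Char.ofNat (48 + n) else Char.ofNat (87 + n)
def pvHexByte (c : Char) : List Char := [pvHexDigit (c.toNat / 16), pvHexDigit (c.toNat % 16)]

-- A's while loop over idx with accumulator res: a non-'%' char is hex-encoded (idx+=1);
-- at a '%' the next two chars infohash[idx+1:idx+3] pass through literally (idx+=3)
def pvALoop (cs : List Char) (res : List Char) : List Char :=
  match cs with
  | [] => res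
  | c :: rest =>
      if c ≠ '%' then pvALoop rest (res ++ pvHexByte c)
      else pvALoop (rest.drop 2) (res ++ rest.take 2)
termination_by cs.length
decreasing_by all_goals simp

def convert_url_hash_to_hex (infohash : String) : String :=
  String.mk (pvALoop infohash.toList [])

-- ===== PORT B =====
-- B's while loop: j = find('%') (j = -1 becomes n, i.e. getD cs.length); batch-encode the
-- chunk [i:j]; if a marker was found copy the two chars after it literally; continue at j+3
def pvBLoop (cs : List Char) : List Char :=
  let j := (cs.findIdx? (· = '%')).getD cs.length
  if _h : j < cs.length then
    (cs.take j).flatMap pvHexByte ++ (cs.drop (j+1)).take 2 ++ pvBLoop (cs.drop (j+3))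
  else
    cs.flatMap pvHexByte
termination_by cs.length
decreasing_by simp; omega

def convert_url_hash_to_hex_alt (infohash : String) : String :=
  String.mk (pvBLoop infohash.toList)

-- ===== PRECONDITION & SPEC =====
def Spec_convert_url_hash_to_hex (infohash : String) (out : String) : Prop := out = convert_url_hash_to_hex_alt infohash
instance (infohash : String) (out : String) : Decidable (Spec_convert_url_hash_to_hex infohash out) := by unfold Spec_convert_url_hash_to_hex; infer_instance

-- ===== CLAIM (what is proved, stated in full; the proofs are below) =====
def Claim_equal_convert_url_hash_to_hex : Prop := ∀ (infohash : String), Dom_convert_url_hash_to_hex infohash → Spec_convert_url_hash_to_hex infohash (convert_url_hash_to_hex infohash)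

-- ===== LEMMAS AND PROOFS =====

-- unfolding pvBLoop at a leading '%': empty chunk, copy two, recurse two further on
theorem pvB_pct (rest : List Char) :
    pvBLoop ('%' :: rest) = rest.take 2 ++ pvBLoop (rest.drop 2) := by
  rw [pvBLoop]
  simp [List.findIdx?_cons]

-- unfolding pvBLoop at a non-'%' head: the head joins the current chunk
theorem pvB_not_pct (c : Char) (rest : List Char) (h : c ≠ '%') :
    pvBLoop (c :: rest) = pvHexByte c ++ pvBLoop rest := by
  conv_lhs => rw [pvBLoop]
  conv_rhs => rw [pvBLoop]
  cases hf : rest.findIdx? (· = '%') with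
  | none => simp [List.findIdx?_cons, h, hf]
  | some j =>
      by_cases hlt : j < rest.length
      · simp [List.findIdx?_cons, h, hf, hlt]
      · simp [List.findIdx?_cons, h, hf, hlt]

-- A's res is a pure accumulator
theorem pvALoop_acc : ∀ (cs res : List Char), pvALoop cs res = res ++ pvALoop cs []
  | [], res => by simp [pvALoop]
  | c :: rest, res => by
      rw [pvALoop, pvALoop]
      by_cases h : c = '%'
      · rw [if_neg (by simp [h]), if_neg (by simp [h]),
          pvALoop_acc (rest.drop 2) (res ++ rest.take 2),
          pvALoop_acc (rest.drop 2) ([] ++ rest.take 2)]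
        simp
      · rw [if_pos h, if_pos h,
          pvALoop_acc rest (res ++ pvHexByte c),
          pvALoop_acc rest ([] ++ pvHexByte c)]
        simp
termination_by cs => cs.length
decreasing_by all_goals simp

-- the two loops agree
theorem pvLoop_eq : ∀ (cs : List Char), pvALoop cs [] = pvBLoop cs
  | [] => by
      rw [pvALoop, pvBLoop]
      simp
  | c :: rest => by
      rw [pvALoop]
      by_cases h : c = '%'
      · rw [if_neg (by simp [h])]
        subst h
        rw [pvB_pct, pvALoop_acc, pvLoop_eq (rest.drop 2)]
        simp
      · rw [if_pos h, pvB_not_pct c rest h, pvALoop_acc, pvLoop_eq rest]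
        simp
termination_by cs => cs.length
decreasing_by all_goals simp

-- ===== VERDICT (by name: the statement is the Claim_ definition above) =====
theorem convert_url_hash_to_hex_spec : Claim_equal_convert_url_hash_to_hex := by
  intro infohash _
  unfold Spec_convert_url_hash_to_hex convert_url_hash_to_hex convert_url_hash_to_hex_alt
  rw [pvLoop_eq]
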